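-- pv_equiv track=rewrite | github.com/kclab922/Algorithm | programmers/lv1/공원산책/sol.py | solution
-- ===== SOURCE A (Python) =====
-- def solution(park, routes):
--     now = [0, 0]
--     d = { 'S': [1,0], 'E': [0,1], 'N': [-1,0], 'W': [0,-1]}
--
--     for i, p in enumerate(park):
--         if 'S' in p:
--             now = [i, p.index('S')]
--             break
--
--     for r in routes:
--         NEWS, n = r[0], int(r[2])
--         xm, ym = d[NEWS][0], d[NEWS][1]
--         if 0 <= now[0]+(xm*n) < len(park) and 0 <= now[1]+(ym*n) < len(park[0]):
--             count = 0
--             while count < n: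
--                 if park[now[0]+xm][now[1]+ym] == 'X':
--                     break
--                 else:
--                     now = [now[0]+xm, now[1]+ym]
--                     count += 1
--             if count != n:
--                 now = [now[0]-(xm*count), now[1]-(ym*count)]
--
--     return now
-- ===== SOURCE B (Python) =====
-- def solution(park, routes):
--     x, y = next(([i, row.index('S')] for i, row in enumerate(park) if 'S' in row), [0, 0])
--     for r in routes:
--         dx, dy = {'S': (1, 0), 'E': (0, 1), 'N': (-1, 0), 'W': (0, -1)}[r[0]]
--         n = int(r[2])
--         tx, ty = x + dx * n, y + dy * n
--         if 0 <= tx < len(park) and 0 <= ty < len(park[0]) and \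
--            all(park[x + dx * k][y + dy * k] != 'X' for k in range(1, n + 1)):
--             x, y = tx, ty
--     return [x, y]
-- ===== Notes on version B (the rewrite author's own statement) =====
-- stated objective: simpler
-- what changed: B replaces A's step-one-cell-at-a-time-then-revert-on-break mutation loop with a pure obstacle check (all() over the n cells along the path) followed by a single jump to the precomputed target, keeping the destination-only bounds test.
-- outside the precondition, e.g. on solution(['ab', 'c'], ['E 0']): A returns [0, 0], B returns [0, 0]
import Mathlib
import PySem

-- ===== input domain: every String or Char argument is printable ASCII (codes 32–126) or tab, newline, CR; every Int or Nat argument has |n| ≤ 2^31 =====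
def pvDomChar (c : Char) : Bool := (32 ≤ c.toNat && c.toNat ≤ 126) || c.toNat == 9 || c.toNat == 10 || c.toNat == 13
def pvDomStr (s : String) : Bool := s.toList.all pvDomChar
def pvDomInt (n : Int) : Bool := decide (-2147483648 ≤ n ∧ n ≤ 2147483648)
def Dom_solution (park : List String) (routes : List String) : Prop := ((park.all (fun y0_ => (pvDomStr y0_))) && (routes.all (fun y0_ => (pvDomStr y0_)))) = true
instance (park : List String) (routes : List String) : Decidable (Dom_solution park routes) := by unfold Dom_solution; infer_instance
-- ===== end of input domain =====

-- B replaces A's step-then-revert walking loop with a pure path-clear check and a single jump to the target (objective: simpler).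


-- ===== PORT A =====
-- shared cell read park[i][j]: the .getD defaults are reached only outside Pre_ (Python raises IndexError there)
def pvCell (park : List String) (i j : Int) : Char :=
  (PySem.Str.pyGet? ((PySem.List.pyGet? park i).getD "") j).getD ' '

-- the dict d; the (0,0) default is reached only outside Pre_ (Python raises KeyError there)
def pvDir (c : Char) : Int × Int :=
  if c = 'S' then (1, 0) else if c = 'E' then (0, 1)
  else if c = 'N' then (-1, 0) else if c = 'W' then (0, -1) else (0, 0)

-- n = int(r[2]); the defaults are reached only outside Pre_ (Python raises IndexError/ValueError there)
def pvN (r : String) : Int :=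
  (PySem.Int.ofStr? (String.ofList [(PySem.Str.pyGet? r 2).getD ' '])).getD 0

-- A's start scan: first row containing 'S', with p.index('S')
def pvFindStartA : List String → Int → Int × Int
  | [], _ => (0, 0)
  | p :: rest, i =>
    if PySem.Str.isIn "S" p then (i, PySem.Str.find p "S") else pvFindStartA rest (i + 1)

-- A's while loop: walk up to `fuel` cells, stopping before an 'X'; returns (position, count)
def pvWalkA (park : List String) (xm ym : Int) : Int × Int → Nat → (Int × Int) × Nat
  | now, 0 => (now, 0)
  | now, Nat.succ k =>
    if pvCell park (now.1 + xm) (now.2 + ym) = 'X' then (now, 0)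
    else
      let r := pvWalkA park xm ym (now.1 + xm, now.2 + ym) k
      (r.1, r.2 + 1)

-- one iteration of A's route loop (len(park[0]) via headD "": Python short-circuits past it when park = [])
def pvStepA (park : List String) (now : Int × Int) (r : String) : Int × Int :=
  let NEWS := (PySem.Str.pyGet? r 0).getD ' '
  let n := pvN r
  let xm := (pvDir NEWS).1
  let ym := (pvDir NEWS).2
  if 0 ≤ now.1 + xm * n ∧ now.1 + xm * n < (park.length : Int) ∧
     0 ≤ now.2 + ym * n ∧ now.2 + ym * n < ((PySem.Str.len (park.headD "")) : Int) then
    let w := pvWalkA park xm ym now n.toNat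
    if (w.2 : Int) ≠ n then (w.1.1 - xm * (w.2 : Int), w.1.2 - ym * (w.2 : Int)) else w.1
  else now

def solution (park : List String) (routes : List String) : List Int :=
  let fin := routes.foldl (pvStepA park) (pvFindStartA park 0)
  [fin.1, fin.2]

-- ===== PORT B =====
-- B's next(...) over the generator: Option-valued scan
def pvFindStartB : List String → Int → Option (Int × Int)
  | [], _ => none
  | row :: rest, i =>
    if PySem.Str.isIn "S" row then some (i, PySem.Str.find row "S") else pvFindStartB rest (i + 1)

-- one iteration of B's route loop: bounds test on the target, all()-clear test over the path, single jump
def pvStepB (park : List String) (xy : Int × Int) (r : String) : Int × Int :=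
  let d := pvDir ((PySem.Str.pyGet? r 0).getD ' ')
  let n := pvN r
  let tx := xy.1 + d.1 * n
  let ty := xy.2 + d.2 * n
  if (0 ≤ tx ∧ tx < (park.length : Int) ∧ 0 ≤ ty ∧ ty < ((PySem.Str.len (park.headD "")) : Int)) ∧
     ((PySem.List.pyRange 1 (n + 1) 1).all
       (fun k => pvCell park (xy.1 + d.1 * k) (xy.2 + d.2 * k) != 'X')) = true
  then (tx, ty) else xy

def solution_alt (park : List String) (routes : List String) : List Int :=
  let fin := routes.foldl (pvStepB park) ((pvFindStartB park 0).getD (0, 0))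
  [fin.1, fin.2]

-- ===== PRECONDITION & SPEC =====
-- Pre_ excludes exactly the inputs where the Python A raises: ragged parks with a nonempty route list
-- (a row shorter than park[0] can give IndexError while walking) and malformed routes (r[0] not a key
-- of d → KeyError, missing or non-digit r[2] → IndexError/ValueError).  With routes nonempty,
-- rectangularity also excludes some ragged parks A happens to return on (when no route walks into a
-- short row) — ragged grids are outside the problem's domain.
def Pre_solution (park : List String) (routes : List String) : Prop :=
  (routes = [] ∨ ∀ row ∈ park, PySem.Str.len row = PySem.Str.len (park.headD "")) ∧
  (∀ r ∈ routes,
    (PySem.Str.pyGet? r 0).getD ' ' ∈ (['S', 'E', 'N', 'W'] : List Char) ∧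
    0 ≤ (PySem.Int.ofStr? (String.ofList [(PySem.Str.pyGet? r 2).getD ' '])).getD (-1))
instance (park : List String) (routes : List String) : Decidable (Pre_solution park routes) := by
  unfold Pre_solution; infer_instance

def pvWitness_solution : List String × List String :=
  (["SOO", "OXO", "OOO"], ["E 2", "S 2", "W 1"])

def Spec_solution (park : List String) (routes : List String) (out : List Int) : Prop := out = solution_alt park routes
instance (park : List String) (routes : List String) (out : List Int) : Decidable (Spec_solution park routes out) := by unfold Spec_solution; infer_instance

-- ===== CLAIM (what is proved, stated in full; the proofs are below) =====
def Claim_equal_solution : Prop := ∀ (park : List String) (routes : List String), Dom_solution park routes → Pre_solution park routes → Spec_solution park routes (solution park routes)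

-- ===== LEMMAS AND PROOFS =====

-- proof-only helper: the path from `now` (exclusive) for k steps in direction (xm,ym) is obstacle-free
def pvClear (park : List String) (xm ym : Int) : Int × Int → Nat → Bool
  | _, 0 => true
  | now, Nat.succ k =>
    (pvCell park (now.1 + xm) (now.2 + ym) != 'X') &&
      pvClear park xm ym (now.1 + xm, now.2 + ym) k

theorem pvFindStart_eq (park : List String) (i : Int) :
    pvFindStartA park i = (pvFindStartB park i).getD (0, 0) := by
  induction park generalizing i with
  | nil => rfl
  | cons p rest ih =>
    simp only [pvFindStartA, pvFindStartB]
    split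
    · rfl
    · exact ih _

theorem pvRangeClear (park : List String) (xm ym : Int) (k : Nat) (x y : Int) :
    ((List.range k).all
      (fun t => pvCell park (x + xm * (1 + (t : Int))) (y + ym * (1 + (t : Int))) != 'X'))
    = pvClear park xm ym (x, y) k := by
  induction k generalizing x y with
  | zero => rfl
  | succ k ih =>
    rw [List.range_succ_eq_map]
    simp only [List.all_cons, List.all_map, pvClear]
    congr 1
    · norm_num
    · rw [← ih (x + xm) (y + ym)]
      congr 1
      funext t
      simp only [Function.comp_apply, Nat.succ_eq_add_one]
      push_cast
      rw [show x + xm * (1 + ((t : Int) + 1)) = x + xm + xm * (1 + (t : Int)) from by ring,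
        show y + ym * (1 + ((t : Int) + 1)) = y + ym + ym * (1 + (t : Int)) from by ring]

theorem pvAllB_eq_clear (park : List String) (xm ym : Int) (k : Nat) (x y : Int) :
    ((PySem.List.pyRange 1 ((k : Int) + 1) 1).all
      (fun j => pvCell park (x + xm * j) (y + ym * j) != 'X'))
    = pvClear park xm ym (x, y) k := by
  rw [PySem.List.pyRange_one]
  have hk : (((k : Int) + 1 - 1)).toNat = k := by omega
  rw [hk, ← pvRangeClear park xm ym k x y, List.all_map]
  rfl

theorem pvWalkA_clear (park : List String) (xm ym : Int) (k : Nat) (p : Int × Int)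
    (h : pvClear park xm ym p k = true) :
    pvWalkA park xm ym p k = ((p.1 + xm * k, p.2 + ym * k), k) := by
  induction k generalizing p with
  | zero => simp [pvWalkA]
  | succ k ih =>
    simp only [pvClear, Bool.and_eq_true, bne_iff_ne, ne_eq] at h
    simp only [pvWalkA, if_neg (by simpa using h.1)]
    rw [ih (p.1 + xm, p.2 + ym) h.2]
    simp only [Prod.mk.injEq]
    refine ⟨⟨?_, ?_⟩, trivial⟩ <;> push_cast <;> ring

theorem pvWalkA_blocked (park : List String) (xm ym : Int) (k : Nat) (p : Int × Int)
    (h : pvClear park xm ym p k = false) :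
    (pvWalkA park xm ym p k).2 ≠ k ∧
    (pvWalkA park xm ym p k).1.1 - xm * ((pvWalkA park xm ym p k).2 : Int) = p.1 ∧
    (pvWalkA park xm ym p k).1.2 - ym * ((pvWalkA park xm ym p k).2 : Int) = p.2 := by
  induction k generalizing p with
  | zero => simp [pvClear] at h
  | succ k ih =>
    simp only [pvClear, Bool.and_eq_false_iff] at h
    by_cases hx : pvCell park (p.1 + xm) (p.2 + ym) = 'X'
    · simp [pvWalkA, hx]
    · have hb : pvClear park xm ym (p.1 + xm, p.2 + ym) k = false := by
        rcases h with h | h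
        · exact absurd hx (by simpa using h)
        · exact h
      obtain ⟨h1, h2, h3⟩ := ih (p.1 + xm, p.2 + ym) hb
      simp only [pvWalkA, if_neg hx]
      refine ⟨by omega, ?_, ?_⟩ <;> push_cast <;> push_cast at h2 h3 <;> [linarith; linarith]

theorem pvStep_eq (park : List String) (r : String) (now : Int × Int)
    (hn : 0 ≤ pvN r) :
    pvStepA park now r = pvStepB park now r := by
  obtain ⟨k, hk⟩ : ∃ k : Nat, pvN r = (k : Int) := ⟨(pvN r).toNat, by omega⟩
  simp only [pvStepA, pvStepB, hk]
  set xm := (pvDir ((PySem.Str.pyGet? r 0).getD ' ')).1 with hxm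
  set ym := (pvDir ((PySem.Str.pyGet? r 0).getD ' ')).2 with hym
  rw [pvAllB_eq_clear park xm ym k now.1 now.2]
  by_cases hb : 0 ≤ now.1 + xm * (k : Int) ∧ now.1 + xm * (k : Int) < (park.length : Int) ∧
      0 ≤ now.2 + ym * (k : Int) ∧ now.2 + ym * (k : Int) < ((PySem.Str.len (park.headD "")) : Int)
  · rw [if_pos hb, Int.toNat_natCast]
    by_cases hc : pvClear park xm ym (now.1, now.2) k = true
    · have hw := pvWalkA_clear park xm ym k now (hc)
      rw [hw, if_neg (show ¬(((k : Nat) : Int) ≠ (k : Int)) by simp), if_pos ⟨hb, hc⟩]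
    · have hcf : pvClear park xm ym (now.1, now.2) k = false := by simpa using hc
      obtain ⟨h1, h2, h3⟩ := pvWalkA_blocked park xm ym k now (hcf)
      rw [if_pos (show ((pvWalkA park xm ym now k).2 : Int) ≠ (k : Int) from by exact_mod_cast h1),
        if_neg (fun hcond => hc hcond.2)]
      exact Prod.ext_iff.mpr ⟨h2, h3⟩

  · rw [if_neg hb, if_neg (fun h => hb h.1)]

-- ===== VERDICT (by name: the statement is the Claim_ definition above) =====
theorem solution_spec : Claim_equal_solution := by
  intro park routes _ hpre
  unfold Spec_solution solution solution_alt
  rw [pvFindStart_eq park 0]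
  have hfold : routes.foldl (pvStepA park) ((pvFindStartB park 0).getD (0, 0)) =
      routes.foldl (pvStepB park) ((pvFindStartB park 0).getD (0, 0)) := by
    apply PySem.List.foldl_congr_mem
    intro acc r hr
    apply pvStep_eq park r acc
    have h := (hpre.2 r hr).2
    unfold pvN
    cases h' : PySem.Int.ofStr? (String.ofList [(PySem.Str.pyGet? r 2).getD ' ']) with
    | none => rw [h'] at h; simp at h
    | some m => rw [h'] at h; simpa using h
  rw [hfold]
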